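-- pv_equiv track=rewrite | github.com/FCChinen/sw-rune-study | gemming.py | check_qty
-- ===== SOURCE A (Python) =====
-- def check_qty(rune: dict, stat_list: list):
--     qty = 0
--     has = []
--     for stat in stat_list:
--         exist = rune.get(stat) or rune.get(stat+"I")
--         if exist:
--             qty += 1
--             has.append(stat)
--
--     if qty <= 2:
--         return [rune for rune in stat_list if rune not in has]
--     return []
-- ===== SOURCE B (Python) =====
-- def check_qty(rune: dict, stat_list: list):
--     missing = [s for s in stat_list if not (rune.get(s) or rune.get(s + "I"))]
--     if len(stat_list) - len(missing) <= 2: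
--         return missing
--     return []
-- ===== Notes on version B (the rewrite author's own statement) =====
-- stated objective: simpler
-- what changed: B computes the missing stats directly in one comprehension and derives the present-count as len(stat_list) - len(missing), dropping A's qty counter, the auxiliary 'has' list and its inner 'not in has' membership scan.
import Mathlib
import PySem

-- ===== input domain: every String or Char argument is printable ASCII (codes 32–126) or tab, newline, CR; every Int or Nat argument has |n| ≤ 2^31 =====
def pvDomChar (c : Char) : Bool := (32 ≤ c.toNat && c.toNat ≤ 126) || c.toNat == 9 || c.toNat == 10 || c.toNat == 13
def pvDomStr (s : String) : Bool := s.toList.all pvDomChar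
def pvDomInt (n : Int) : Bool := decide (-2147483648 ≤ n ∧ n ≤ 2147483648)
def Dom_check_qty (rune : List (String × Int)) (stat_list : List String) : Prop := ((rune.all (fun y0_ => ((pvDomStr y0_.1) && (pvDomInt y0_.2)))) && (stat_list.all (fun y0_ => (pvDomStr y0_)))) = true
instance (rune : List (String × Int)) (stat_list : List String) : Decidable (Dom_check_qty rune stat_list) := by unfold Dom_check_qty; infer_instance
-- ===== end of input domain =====

-- B is simpler: one comprehension over the complement, the present-count derived by arithmetic.

-- ===== PORT A =====
-- truthiness of rune.get(stat): None and 0 are falsy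
def pvTruthy (o : Option Int) : Bool :=
  match o with
  | some v => v != 0
  | none => false

def check_qty (rune : List (String × Int)) (stat_list : List String) : List String :=
  let d := PySem.Dict.ofList rune
  let st := stat_list.foldl
    (fun (s : Int × List String) stat =>
      if pvTruthy (d.get? stat) || pvTruthy (d.get? (stat ++ "I")) then
        (s.1 + 1, s.2 ++ [stat])
      else s)
    (0, [])
  if st.1 ≤ 2 then stat_list.filter (fun r => !(st.2.contains r)) else []

-- ===== PORT B =====
def check_qty_alt (rune : List (String × Int)) (stat_list : List String) : List String :=
  let d := PySem.Dict.ofList rune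
  let missing := stat_list.filter
    (fun s => !(pvTruthy (d.get? s) || pvTruthy (d.get? (s ++ "I"))))
  if (stat_list.length : Int) - missing.length ≤ 2 then missing else []

-- ===== PRECONDITION & SPEC =====
def Spec_check_qty (rune : List (String × Int)) (stat_list : List String) (out : List String) : Prop := out = check_qty_alt rune stat_list
instance (rune : List (String × Int)) (stat_list : List String) (out : List String) : Decidable (Spec_check_qty rune stat_list out) := by unfold Spec_check_qty; infer_instance

-- ===== CLAIM (what is proved, stated in full; the proofs are below) =====
def Claim_equal_check_qty : Prop := ∀ (rune : List (String × Int)) (stat_list : List String), Dom_check_qty rune stat_list → Spec_check_qty rune stat_list (check_qty rune stat_list)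

-- ===== LEMMAS AND PROOFS =====

-- A's loop produces (count of present stats, the present stats in order)
theorem pv_loop_eq (p : String → Bool) (l : List String) (q : Int) (h : List String) :
    l.foldl (fun (s : Int × List String) stat =>
      if p stat then (s.1 + 1, s.2 ++ [stat]) else s) (q, h)
      = (q + (l.filter p).length, h ++ l.filter p) := by
  induction l generalizing q h with
  | nil => simp
  | cons x xs ih =>
    by_cases hx : p x
    · simp [hx, ih]
      omega
    · simp [hx, ih]

theorem pv_filter_not_mem (p : String → Bool) (l : List String) :
    l.filter (fun r => !((l.filter p).contains r)) = l.filter (fun s => !(p s)) := by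
  apply List.filter_congr
  intro x hx
  by_cases hp : p x
  · simp [hp, List.mem_filter, hx]
  · simp only [hp]
    simp [List.mem_filter, hp]

theorem pv_length_split (p : String → Bool) (l : List String) :
    (l.filter p).length + (l.filter (fun s => !(p s))).length = l.length := by
  induction l with
  | nil => simp
  | cons x xs ih =>
    by_cases hx : p x <;> simp [hx] <;> omega

-- ===== VERDICT (by name: the statement is the Claim_ definition above) =====
theorem check_qty_spec : Claim_equal_check_qty := by
  intro rune stat_list _
  unfold Spec_check_qty check_qty check_qty_alt
  set d := PySem.Dict.ofList rune with hd
  set p : String → Bool := fun s => pvTruthy (d.get? s) || pvTruthy (d.get? (s ++ "I")) with hp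
  simp only
  rw [pv_loop_eq p stat_list 0 []]
  simp only [List.nil_append]
  rw [pv_filter_not_mem p stat_list]
  have hlen := pv_length_split p stat_list
  have : ((stat_list.filter p).length : Int)
      = (stat_list.length : Int) - (stat_list.filter (fun s => !(p s))).length := by
    omega
  rw [zero_add, this]
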